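-- pv_equiv track=rewrite | github.com/PSC-INF02/psc | src/abstracter/parsers/tokenizer.py | custom_sent_tokenize
-- ===== SOURCE A (Python) =====
-- BOUNDARIES = ["!", ".", "?", "\n", "'"]
--
-- def custom_sent_tokenize(text):
--     """
--     Custom sentence tokenizer.
--
--     @param text Raw text data (str or any character iterable).
--     @return A list of sentences (str).
--     """
--     temp = []
--     sents = []
--     car2 = ' '
--     for car in text:
--         if (car.isupper() and car2.islower()):
--             sents.append(''.join(temp))
--             temp = []
--             temp.append(car)
--         elif car not in BOUNDARIES:
--             temp.append(car)
--         else: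
--             sents.append(''.join(temp))
--             temp = []
--         car2 = car
--     return sents
-- ===== SOURCE B (Python) =====
-- BOUNDARIES = ["!", ".", "?", "\n", "'"]
--
-- def custom_sent_tokenize(text):
--     # pass 1: record cut events (segment_end, next_segment_start)
--     cuts = []
--     prev = ' '
--     for i, car in enumerate(text):
--         if car.isupper() and prev.islower():
--             cuts.append((i, i))       # case split: uppercase char opens the next sentence
--         elif car in BOUNDARIES:
--             cuts.append((i, i + 1))   # boundary char is dropped
--         prev = car
--     # pass 2: slice each sentence out of the text (trailing tail never emitted)
--     sents = []
--     start = 0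
--     for end, nxt in cuts:
--         sents.append(text[start:end])
--         start = nxt
--     return sents
-- ===== Notes on version B (the rewrite author's own statement) =====
-- stated objective: alternative
-- what changed: Replaces A's single accumulate-and-flush loop (growing a temp char buffer, flushing it into sents at each split) with two passes: a first scan that only records cut events (end index, next start) for boundaries and lower-to-upper transitions, then a second pass that slices each sentence directly out of the text between consecutive cuts.
import Mathlib
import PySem

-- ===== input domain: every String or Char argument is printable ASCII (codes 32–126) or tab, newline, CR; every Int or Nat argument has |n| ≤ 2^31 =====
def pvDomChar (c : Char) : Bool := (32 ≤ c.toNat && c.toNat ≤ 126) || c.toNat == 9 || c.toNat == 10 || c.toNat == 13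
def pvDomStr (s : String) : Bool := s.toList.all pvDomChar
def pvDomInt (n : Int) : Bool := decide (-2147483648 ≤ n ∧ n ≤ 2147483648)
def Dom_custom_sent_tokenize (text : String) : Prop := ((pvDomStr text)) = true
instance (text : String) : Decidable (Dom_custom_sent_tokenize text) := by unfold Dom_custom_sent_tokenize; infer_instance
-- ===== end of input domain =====

-- B records cut events in one scan and slices the sentences in a second pass,
-- instead of A's accumulate-and-flush buffer loop; same cost, different decomposition.

-- ===== PORT A =====
def pvBoundaries : List Char := ['!', '.', '?', '\n', '\'']

-- A's for-loop: state (temp, sents, car2), processed step for step.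
def pvTokA : List Char → List Char → List String → Char → List String
  | [], _, sents, _ => sents
  | c :: cs, temp, sents, car2 =>
    if PySem.Chars.isupper c && PySem.Chars.islower car2 then
      pvTokA cs [c] (sents ++ [String.ofList temp]) c
    else if !(pvBoundaries.contains c) then
      pvTokA cs (temp ++ [c]) sents c
    else
      pvTokA cs [] (sents ++ [String.ofList temp]) c

def custom_sent_tokenize (text : String) : List String :=
  pvTokA text.toList [] [] ' '

-- ===== PORT B =====
-- pass 1: record (end index, next start) cut events
def pvCutsB : List Char → Nat → Char → List (Nat × Nat)
  | [], _, _ => []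
  | c :: cs, i, prev =>
    if PySem.Chars.isupper c && PySem.Chars.islower prev then
      (i, i) :: pvCutsB cs (i + 1) c
    else if pvBoundaries.contains c then
      (i, i + 1) :: pvCutsB cs (i + 1) c
    else
      pvCutsB cs (i + 1) c

-- pass 2: text[start:end] for each cut (PySem.List.slice = Python slicing, exact)
def pvBuildB (full : List Char) : Nat → List (Nat × Nat) → List String
  | _, [] => []
  | start, (e, ns) :: rest =>
    String.ofList (PySem.List.slice full (some (start : Int)) (some (e : Int))) :: pvBuildB full ns rest

def custom_sent_tokenize_alt (text : String) : List String :=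
  pvBuildB text.toList 0 (pvCutsB text.toList 0 ' ')

-- ===== PRECONDITION & SPEC =====
def Spec_custom_sent_tokenize (text : String) (out : List String) : Prop := out = custom_sent_tokenize_alt text
instance (text : String) (out : List String) : Decidable (Spec_custom_sent_tokenize text out) := by unfold Spec_custom_sent_tokenize; infer_instance

-- ===== CLAIM (what is proved, stated in full; the proofs are below) =====
def Claim_equal_custom_sent_tokenize : Prop := ∀ (text : String), Dom_custom_sent_tokenize text → Spec_custom_sent_tokenize text (custom_sent_tokenize text)

-- ===== LEMMAS AND PROOFS =====

-- extend A's buffer by one char = take one more char of the text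
lemma pv_take_snoc (full : List Char) (c : Char) (cs : List Char) (start i : Nat)
    (hsi : start ≤ i) (hdrop : full.drop i = c :: cs) :
    (full.drop start).take (i - start) ++ [c] = (full.drop start).take (i + 1 - start) := by
  have hidx : (full.drop start)[i - start]? = some c := by
    rw [List.getElem?_drop]
    have : start + (i - start) = i := by omega
    rw [this]
    have := congrArg (fun l => l[0]?) hdrop
    simpa [List.getElem?_drop] using this
  have : i + 1 - start = (i - start) + 1 := by omega
  rw [this, List.take_add_one, hidx]
  rfl

lemma pv_main (full : List Char) : ∀ (cs : List Char) (i start : Nat) (prev : Char)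
    (sents : List String), start ≤ i → full.drop i = cs →
    pvTokA cs ((full.drop start).take (i - start)) sents prev
      = sents ++ pvBuildB full start (pvCutsB cs i prev) := by
  intro cs
  induction cs with
  | nil => intro i start prev sents _ _; simp [pvTokA, pvCutsB, pvBuildB]
  | cons c cs ih =>
    intro i start prev sents hsi hdrop
    have hdrop1 : full.drop (i + 1) = cs := by
      rw [← List.drop_drop, hdrop]
      rfl
    have hslice : PySem.List.slice full (some (start : Int)) (some (i : Int))
        = (full.drop start).take (i - start) := PySem.List.slice_natCast full start i
    by_cases hcase : (PySem.Chars.isupper c && PySem.Chars.islower prev) = true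
    · -- case split: cut (i, i), next buffer [c]
      have hc1 : (full.drop i).take (i + 1 - i) = [c] := by
        simp [hdrop]
      rw [pvTokA, pvCutsB, if_pos hcase, if_pos hcase, pvBuildB, hslice]
      have := ih (i + 1) i c (sents ++ [String.ofList ((full.drop start).take (i - start))])
        (by omega) hdrop1
      rw [hc1] at this
      rw [this]
      simp only [List.append_assoc, List.singleton_append]
    · by_cases hb : pvBoundaries.contains c = true
      · -- boundary: cut (i, i+1), next buffer []
        have hc0 : (full.drop (i + 1)).take (i + 1 - (i + 1)) = [] := by simp
        rw [pvTokA, pvCutsB, if_neg hcase, if_neg hcase, if_pos hb]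
        rw [show (!pvBoundaries.contains c) = false by simp only [hb, Bool.not_true]]
        simp only [Bool.false_eq_true, if_false]
        rw [pvBuildB, hslice]
        have := ih (i + 1) (i + 1) c (sents ++ [String.ofList ((full.drop start).take (i - start))])
          (le_refl _) hdrop1
        rw [hc0] at this
        rw [this]
        simp only [List.append_assoc, List.singleton_append]
      · -- plain char: buffer grows
        rw [pvTokA, pvCutsB, if_neg hcase, if_neg hcase, if_neg hb]
        have hb' : pvBoundaries.contains c = false := by
          revert hb; cases pvBoundaries.contains c <;> simp
        rw [show (!pvBoundaries.contains c) = true by simp only [hb', Bool.not_false]]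
        simp only [if_true]
        have := ih (i + 1) start c sents (by omega) hdrop1
        rw [← pv_take_snoc full c cs start i hsi hdrop] at this
        exact this

-- ===== VERDICT (by name: the statement is the Claim_ definition above) =====
theorem custom_sent_tokenize_spec : Claim_equal_custom_sent_tokenize := by
  intro text _
  unfold Spec_custom_sent_tokenize custom_sent_tokenize custom_sent_tokenize_alt
  have := pv_main text.toList text.toList 0 0 ' ' [] (le_refl 0) (by simp)
  simpa using this
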